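-- pv_equiv track=rewrite | github.com/rf-iasys/OEIS | OEIS_A154117.py | A154117
-- ===== SOURCE A (Python) =====
-- def A154117(n):
--     marked = []
--     current = 1
--     k1 = 2
--     k2 = 3
--     k = k1
--
--     while len(marked) < n:
--         marked.append(k)
--         k += k + k2
--         current += k//2
--
--     return marked
-- ===== SOURCE B (Python) =====
-- def A154117(n):
--     return [5 * (1 << i) - 3 for i in range(n)]
-- ===== Notes on version B (the rewrite author's own statement) =====
-- stated objective: simpler
-- what changed: Replaces the stateful doubling recurrence (running k with a dead `current` accumulator) with a direct closed-form comprehension over range(n).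
import Mathlib
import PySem

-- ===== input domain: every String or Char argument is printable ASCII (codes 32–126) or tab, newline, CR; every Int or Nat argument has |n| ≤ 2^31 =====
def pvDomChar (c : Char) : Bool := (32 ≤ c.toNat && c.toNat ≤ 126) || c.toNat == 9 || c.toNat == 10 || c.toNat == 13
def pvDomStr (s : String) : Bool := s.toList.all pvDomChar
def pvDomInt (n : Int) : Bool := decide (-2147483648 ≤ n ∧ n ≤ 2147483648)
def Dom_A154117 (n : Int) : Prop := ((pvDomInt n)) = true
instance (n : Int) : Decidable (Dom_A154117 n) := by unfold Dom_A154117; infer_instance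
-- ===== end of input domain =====

-- B replaces A's stateful recurrence loop (running k, dead `current`) with the closed form 5*2^i-3; objective: simpler.

-- ===== PORT A =====
-- while len(marked) < n: marked.append(k); k += k + k2; current += k//2   (k2 = 3)
def A154117.loop (n : Int) (marked : List Int) (current k : Int) : List Int :=
  if h : (marked.length : Int) < n then
    A154117.loop n (marked ++ [k]) (current + (k + k + 3) / 2) (k + k + 3)
  else marked
termination_by (n - marked.length).toNat
decreasing_by simp; omega

def A154117 (n : Int) : List Int :=
  A154117.loop n [] 1 2

-- ===== PORT B =====
-- return [5 * (1 << i) - 3 for i in range(n)]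
def A154117_alt (n : Int) : List Int :=
  (PySem.List.pyRange 0 n 1).map (fun i => 5 * 2 ^ i.toNat - 3)

-- ===== PRECONDITION & SPEC =====
def Spec_A154117 (n : Int) (out : List Int) : Prop := out = A154117_alt n
instance (n : Int) (out : List Int) : Decidable (Spec_A154117 n out) := by unfold Spec_A154117; infer_instance

-- ===== CLAIM (what is proved, stated in full; the proofs are below) =====
def Claim_equal_A154117 : Prop := ∀ (n : Int), Dom_A154117 n → Spec_A154117 n (A154117 n)

-- ===== LEMMAS AND PROOFS =====

-- The loop appends, for each t < remaining count, the value 2^t*(k+3)-3 (closed form of k_{t+1} = 2k_t+3).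
theorem A154117_loop_eq (n : Int) (marked : List Int) (current k : Int) :
    A154117.loop n marked current k
      = marked ++ (List.range (n - marked.length).toNat).map (fun t => 2 ^ t * (k + 3) - 3) := by
  by_cases h : (marked.length : Int) < n
  · rw [A154117.loop, dif_pos h, A154117_loop_eq]
    have hlen : ((marked ++ [k]).length : Int) = marked.length + 1 := by simp
    have h1 : (n - (marked ++ [k]).length).toNat + 1 = (n - marked.length).toNat := by
      simp at hlen ⊢; omega
    rw [← h1, List.range_succ_eq_map]
    simp [List.append_assoc, List.map_map, Function.comp]
    intro t _
    ring
  · rw [A154117.loop, dif_neg h]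
    have : (n - marked.length).toNat = 0 := by omega
    simp [this]
termination_by (n - marked.length).toNat
decreasing_by simp; omega

-- ===== VERDICT (by name: the statement is the Claim_ definition above) =====
theorem A154117_spec : Claim_equal_A154117 := by
  intro n _
  unfold Spec_A154117 A154117 A154117_alt
  rw [A154117_loop_eq, PySem.List.pyRange_one]
  simp [List.map_map, Function.comp]
  intro t _
  ring
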